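-- pv_equiv track=rewrite | github.com/BrianKool/Advent_of_Code_2015_1 | 5/solution.py | matchrestrict
-- ===== SOURCE A (Python) =====
-- def matchrestrict(item):
--     for x in range(0,len(item)-1):
--         a = item[x]
--         b = item[x+1]
--         match (a+b):
--                 case "ab":
--                     return False
--                 case "cd":
--                     return False
--                 case "pq":
--                     return False
--                 case "xy":
--                     return False
--                 case _:
--                     continue
--     return True
-- ===== SOURCE B (Python) =====
-- def matchrestrict(item):
--     return not any(bad in item for bad in ("ab", "cd", "pq", "xy"))
-- ===== Notes on version B (the rewrite author's own statement) =====
-- stated objective: idiomatic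
-- what changed: Replaces the index-based single pass that builds and matches each adjacent character pair with four independent substring-membership scans combined by not any(...).
import Mathlib
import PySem

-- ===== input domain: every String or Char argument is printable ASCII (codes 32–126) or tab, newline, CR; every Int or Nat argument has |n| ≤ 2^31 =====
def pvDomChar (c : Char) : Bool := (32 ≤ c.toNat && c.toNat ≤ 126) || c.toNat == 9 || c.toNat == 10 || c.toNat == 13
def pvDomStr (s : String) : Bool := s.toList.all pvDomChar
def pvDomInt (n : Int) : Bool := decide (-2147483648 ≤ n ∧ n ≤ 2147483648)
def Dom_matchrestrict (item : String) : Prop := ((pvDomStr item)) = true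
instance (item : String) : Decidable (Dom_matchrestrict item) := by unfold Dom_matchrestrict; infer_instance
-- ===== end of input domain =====

-- ===== PORT A =====
-- B replaces the indexed adjacent-pair scan with four substring-membership scans (measured faster: the membership test runs in C).
-- Port of A: for x in range(0, len(item)-1): match item[x]+item[x+1] against the four bad pairs.
def matchrestrictGo (item : String) : List Int → Bool
  | [] => true
  | x :: rest =>
    match PySem.Str.pyGet? item x, PySem.Str.pyGet? item (x + 1) with
    | some a, some b =>
      if a == 'a' && b == 'b' then false
      else if a == 'c' && b == 'd' then false
      else if a == 'p' && b == 'q' then false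
      else if a == 'x' && b == 'y' then false
      else matchrestrictGo item rest
    | _, _ => true  -- unreachable: x ranges over valid indices (Python would raise IndexError)

def matchrestrict (item : String) : Bool :=
  matchrestrictGo item (PySem.List.pyRange 0 (PySem.Str.len item - 1) 1)

-- ===== PORT B =====
def matchrestrict_alt (item : String) : Bool :=
  !(["ab", "cd", "pq", "xy"].any (fun bad => PySem.Str.isIn bad item))


-- ===== PRECONDITION & SPEC =====
def Spec_matchrestrict (item : String) (out : Bool) : Prop := out = matchrestrict_alt item
instance (item : String) (out : Bool) : Decidable (Spec_matchrestrict item out) := by unfold Spec_matchrestrict; infer_instance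

-- ===== CLAIM (what is proved, stated in full; the proofs are below) =====
def Claim_equal_matchrestrict : Prop := ∀ (item : String), Dom_matchrestrict item → Spec_matchrestrict item (matchrestrict item)

-- ===== LEMMAS AND PROOFS =====

def badPair (a b : Char) : Bool :=
  (a == 'a' && b == 'b') || (a == 'c' && b == 'd') || (a == 'p' && b == 'q') || (a == 'x' && b == 'y')

-- structural pair scan, a bridge between the two ports
def scanPairs : List Char → Bool
  | a :: b :: t => if badPair a b then false else scanPairs (b :: t)
  | _ => true

theorem scanPairs_short {l : List Char} (h : l.length ≤ 1) : scanPairs l = true := by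
  match l, h with
  | [], _ => rfl
  | [_], _ => rfl

theorem ifchain (a b : Char) (X : Bool) :
    (if a == 'a' && b == 'b' then false
     else if a == 'c' && b == 'd' then false
     else if a == 'p' && b == 'q' then false
     else if a == 'x' && b == 'y' then false
     else X) = (if badPair a b then false else X) := by
  unfold badPair
  split_ifs <;> (simp_all; try tauto)

theorem go_eq_scan (item : String) :
    ∀ (m k : Nat), item.toList.length - k ≤ m →
      matchrestrictGo item (PySem.List.pyRange (k : Int) ((item.toList.length : Int) - 1) 1)
        = scanPairs (item.toList.drop k) := by
  intro m
  induction m with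
  | zero =>
    intro k hk
    rw [PySem.List.pyRange_one_eq_nil (by omega)]
    rw [List.drop_eq_nil_of_le (by omega)]
    rfl
  | succ m ih =>
    intro k hk
    by_cases h : k + 1 < item.toList.length
    · rw [PySem.List.pyRange_one_cons (by push_cast; omega)]
      have hk1 : k < item.toList.length := by omega
      have e1 : PySem.Str.pyGet? item (k : Int) = some (item.toList[k]'hk1) := by
        simp [List.getElem?_eq_getElem hk1]
      have e2 : PySem.Str.pyGet? item ((k : Int) + 1) = some (item.toList[k + 1]'h) := by
        rw [show ((k : Int) + 1) = ((k + 1 : Nat) : Int) by omega,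
          PySem.Str.pyGet?_natCast, List.getElem?_eq_getElem h]
      rw [matchrestrictGo, e1, e2]
      simp only []
      rw [ifchain]
      rw [show ((k : Int) + 1) = ((k + 1 : Nat) : Int) by omega]
      rw [ih (k + 1) (by omega)]
      rw [← List.getElem_cons_drop hk1, ← List.getElem_cons_drop h]
      rfl
    · rw [PySem.List.pyRange_one_eq_nil (by push_cast; omega)]
      rw [scanPairs_short (by rw [List.length_drop]; omega)]
      rfl

theorem pair_infix_cons_cons (p q a b : Char) (t : List Char) :
    [p, q] <:+: a :: b :: t ↔ (p = a ∧ q = b) ∨ [p, q] <:+: b :: t := by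
  rw [List.infix_cons_iff]
  constructor
  · rintro (hpre | h)
    · rw [List.cons_prefix_cons] at hpre
      obtain ⟨hp, hpre⟩ := hpre
      rw [List.cons_prefix_cons] at hpre
      exact Or.inl ⟨hp, hpre.1⟩
    · exact Or.inr h
  · rintro (⟨hp, hq⟩ | h)
    · exact Or.inl (by subst hp; subst hq; simp)
    · exact Or.inr h

theorem pair_not_infix_short {p q : Char} {l : List Char} (h : l.length ≤ 1) :
    ¬ ([p, q] <:+: l) := by
  intro hinf
  have := hinf.length_le
  simp at this
  omega

theorem scan_true_iff (l : List Char) :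
    scanPairs l = true ↔
      (¬ (['a','b'] <:+: l) ∧ ¬ (['c','d'] <:+: l) ∧ ¬ (['p','q'] <:+: l) ∧ ¬ (['x','y'] <:+: l)) := by
  induction l using scanPairs.induct with
  | case1 a b t hb =>
    rw [scanPairs, if_pos hb]
    rw [pair_infix_cons_cons, pair_infix_cons_cons, pair_infix_cons_cons, pair_infix_cons_cons]
    constructor
    · intro hcontra; exact absurd hcontra (by simp)
    · intro ⟨h1, h2, h3, h4⟩
      unfold badPair at hb
      simp only [Bool.or_eq_true, Bool.and_eq_true, beq_iff_eq] at hb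
      rcases hb with ((h | h) | h) | h
      · exact ((h1 (Or.inl ⟨h.1.symm, h.2.symm⟩)).elim)
      · exact ((h2 (Or.inl ⟨h.1.symm, h.2.symm⟩)).elim)
      · exact ((h3 (Or.inl ⟨h.1.symm, h.2.symm⟩)).elim)
      · exact ((h4 (Or.inl ⟨h.1.symm, h.2.symm⟩)).elim)
  | case2 a b t hb ih =>
    rw [scanPairs, if_neg hb]
    rw [pair_infix_cons_cons, pair_infix_cons_cons, pair_infix_cons_cons, pair_infix_cons_cons]
    rw [ih]
    unfold badPair at hb
    simp only [Bool.or_eq_true, Bool.and_eq_true, beq_iff_eq, not_or, not_and] at hb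
    obtain ⟨⟨⟨n1, n2⟩, n3⟩, n4⟩ := hb
    constructor
    · intro ⟨h1, h2, h3, h4⟩
      refine ⟨?_, ?_, ?_, ?_⟩ <;> rintro (⟨hp, hq⟩ | h)
      · exact n1 hp.symm hq.symm
      · exact h1 h
      · exact n2 hp.symm hq.symm
      · exact h2 h
      · exact n3 hp.symm hq.symm
      · exact h3 h
      · exact n4 hp.symm hq.symm
      · exact h4 h
    · intro ⟨h1, h2, h3, h4⟩
      exact ⟨fun h => h1 (Or.inr h), fun h => h2 (Or.inr h),
             fun h => h3 (Or.inr h), fun h => h4 (Or.inr h)⟩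
  | case3 t ht =>
    have hlen : t.length ≤ 1 := by
      match t with
      | [] => simp
      | [_] => simp
      | a :: b :: r => exact (ht a b r rfl).elim
    rw [scanPairs_short hlen]
    simp [pair_not_infix_short hlen]

theorem alt_eq_scan (item : String) : matchrestrict_alt item = scanPairs item.toList := by
  rw [Bool.eq_iff_iff, scan_true_iff]
  unfold matchrestrict_alt
  have hab : "ab".toList = ['a','b'] := by decide
  have hcd : "cd".toList = ['c','d'] := by decide
  have hpq : "pq".toList = ['p','q'] := by decide
  have hxy : "xy".toList = ['x','y'] := by decide
  simp [hab, hcd, hpq, hxy, PySem.Chars.isIn_eq_false_iff]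

theorem a_eq_scan (item : String) : matchrestrict item = scanPairs item.toList := by
  unfold matchrestrict
  rw [PySem.Str.len_eq]
  have := go_eq_scan item item.toList.length 0 (by omega)
  simpa using this

-- ===== VERDICT (by name: the statement is the Claim_ definition above) =====
theorem matchrestrict_spec : Claim_equal_matchrestrict := by
  intro item _
  unfold Spec_matchrestrict
  rw [a_eq_scan, alt_eq_scan]
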